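-- pv_equiv track=rewrite | github.com/suibe-youyiwei/python_mooc_pku | bigO.py | fun_O1
-- ===== SOURCE A (Python) =====
-- def fun_O1(n):
--     a = 5
--     b = 6
--     c= 10
--     for i in range(n):
--         for j in range(n):
--             x = i*i
--             y = j*j
--             z = i*j
--     for k in range(n):
--         w = a*k+45
--         v = b*b
--     d = 33
--     return x,y,z,w,v,d
-- ===== SOURCE B (Python) =====
-- def fun_O1(n):
--     # Closed form of A's loop residues: last i=j=k=n-1, so x=y=z=(n-1)^2,
--     # w=5*(n-1)+45, v=6*6, d=33. O(1) instead of O(n^2).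
--     m = n - 1
--     return m * m, m * m, m * m, 5 * m + 45, 36, 33
-- ===== Notes on version B (the rewrite author's own statement) =====
-- stated objective: faster
-- what changed: Replaced the O(n^2) nested loops (whose bodies only leave behind the final iteration's values) by the O(1) closed form x=y=z=(n-1)^2, w=5*(n-1)+45, v=36, d=33; Pre_ excludes n<=0, where A raises UnboundLocalError (x is never assigned).
import Mathlib
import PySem

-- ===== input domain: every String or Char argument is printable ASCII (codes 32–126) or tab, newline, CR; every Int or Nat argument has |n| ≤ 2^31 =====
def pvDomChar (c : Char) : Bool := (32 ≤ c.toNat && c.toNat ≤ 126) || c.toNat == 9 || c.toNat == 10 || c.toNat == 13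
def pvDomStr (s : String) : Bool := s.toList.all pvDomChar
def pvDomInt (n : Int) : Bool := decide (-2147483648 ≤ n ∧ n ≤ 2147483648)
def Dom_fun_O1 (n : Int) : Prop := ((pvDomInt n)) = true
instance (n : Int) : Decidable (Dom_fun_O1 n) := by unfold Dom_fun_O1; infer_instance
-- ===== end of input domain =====

-- B replaces A's O(n^2) nested loops (whose bodies only leave last-iteration values) by the O(1) closed form.

-- ===== PORT A =====
-- Literal port: the loops fold over range(n), carrying the loop-assigned variables.
-- x,y,z (and w,v) start at a dead default 0, never read when n ≥ 1 (Pre_ excludes n ≤ 0, where Python raises UnboundLocalError).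
def fun_O1 (n : Int) : List Int :=
  let a : Int := 5
  let b : Int := 6
  let _c : Int := 10
  let s :=
    (PySem.List.pyRange 0 n 1).foldl
      (fun s i => (PySem.List.pyRange 0 n 1).foldl (fun _ j => (i * i, j * j, i * j)) s)
      ((0 : Int), (0 : Int), (0 : Int))
  let t :=
    (PySem.List.pyRange 0 n 1).foldl (fun _ k => (a * k + 45, b * b)) ((0 : Int), (0 : Int))
  let d : Int := 33
  [s.1, s.2.1, s.2.2, t.1, t.2, d]

-- ===== PORT B =====
def fun_O1_alt (n : Int) : List Int :=
  let m := n - 1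
  [m * m, m * m, m * m, 5 * m + 45, 36, 33]

-- ===== PRECONDITION & SPEC =====
-- Pre_ excludes n ≤ 0: there A's loops never run and Python raises UnboundLocalError (x is unbound).
def Pre_fun_O1 (n : Int) : Prop := 1 ≤ n
instance (n : Int) : Decidable (Pre_fun_O1 n) := by unfold Pre_fun_O1; infer_instance
def pvWitness_fun_O1 : Int := 3

def Spec_fun_O1 (n : Int) (out : List Int) : Prop := out = fun_O1_alt n
instance (n : Int) (out : List Int) : Decidable (Spec_fun_O1 n out) := by unfold Spec_fun_O1; infer_instance

-- ===== CLAIM (what is proved, stated in full; the proofs are below) =====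
def Claim_equal_fun_O1 : Prop := ∀ (n : Int), Dom_fun_O1 n → Pre_fun_O1 n → Spec_fun_O1 n (fun_O1 n)

-- ===== LEMMAS AND PROOFS =====

theorem pyRange_split (n : Int) (h : 1 ≤ n) :
    PySem.List.pyRange 0 n 1 = PySem.List.pyRange 0 (n - 1) 1 ++ [n - 1] := by
  have := PySem.List.pyRange_one_succ_right (a := 0) (b := n - 1) (by omega)
  simpa using this

-- ===== VERDICT (by name: the statement is the Claim_ definition above) =====
theorem fun_O1_spec : Claim_equal_fun_O1 := by
  intro n _ hpre
  unfold Spec_fun_O1 fun_O1 fun_O1_alt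
  rw [pyRange_split n hpre]
  simp only [List.foldl_append, List.foldl_cons, List.foldl_nil]
  ring_nf
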